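-- pv_equiv track=rewrite | github.com/workbuddy248/Agent | testAgent/backend/services/playwright_generator.py | _extract_test_function
-- ===== SOURCE A (Python) =====
-- def _extract_test_function(test_code: str) -> str:
--     """Extract just the test function from complete test code"""
--     lines = test_code.split("\n")
--
--     # Find the start of the test function
--     start_index = -1
--     for i, line in enumerate(lines):
--         if line.strip().startswith("test("):
--             start_index = i
--             break
--
--     if start_index == -1:
--         return test_code
--
--     # Return everything from the test function onwards
--     return "\n".join(lines[start_index:])
-- ===== SOURCE B (Python) =====
-- def _extract_test_function(test_code: str) -> str:
--     """Extract just the test function from complete test code (single scan over the raw string)."""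
--     i = 0  # offset of the current line start in test_code
--     while True:
--         j = i
--         while j < len(test_code) and test_code[j] in " \t\r":
--             j += 1
--         if test_code.startswith("test(", j):
--             return test_code[i:]
--         nl = test_code.find("\n", i)
--         if nl == -1:
--             return test_code
--         i = nl + 1
-- ===== Notes on version B (the rewrite author's own statement) =====
-- stated objective: idiomatic
-- what changed: Replaced split-into-lines/scan/join-back with a single index scan over the raw string that checks each line start directly and returns the matching suffix by one slice, so no line list or rejoined string is ever built.
import Mathlib
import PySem

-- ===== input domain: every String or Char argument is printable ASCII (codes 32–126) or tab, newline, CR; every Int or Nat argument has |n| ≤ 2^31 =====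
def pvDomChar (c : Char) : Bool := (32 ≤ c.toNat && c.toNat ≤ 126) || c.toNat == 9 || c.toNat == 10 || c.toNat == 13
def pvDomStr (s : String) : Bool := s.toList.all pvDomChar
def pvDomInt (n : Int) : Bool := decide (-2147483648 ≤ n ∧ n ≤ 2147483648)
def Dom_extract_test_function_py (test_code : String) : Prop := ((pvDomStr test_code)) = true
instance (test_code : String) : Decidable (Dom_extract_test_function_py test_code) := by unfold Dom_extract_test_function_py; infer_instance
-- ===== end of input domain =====

-- B replaces A's split-into-lines / indexed scan / join-back with one scan over the raw
-- string that checks each line start directly and returns the matching suffix (idiomatic).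

-- ===== PORT A =====
-- line.strip().startswith("test(")
def pvHitA (line : List Char) : Bool :=
  PySem.Chars.startswith (PySem.Chars.strip line) ['t', 'e', 's', 't', '(']

-- the 'for i, line in enumerate(lines): … break' loop, carrying i; -1 = not found
def pvStartLoopA (i : Nat) (lines : List (List Char)) : Int :=
  match lines with
  | [] => -1
  | line :: rest => if pvHitA line then (i : Int) else pvStartLoopA (i + 1) rest

-- test_code.split("\n") with the nonempty literal separator is PySem.Chars.splitOn (exact);
-- strings are handled as their char lists via the PySem.Chars wrappers
def extract_test_function_py (test_code : String) : String :=
  if pvStartLoopA 0 (PySem.Chars.splitOn test_code.toList ['\n']) = -1 then test_code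
  else String.ofList (PySem.Chars.join ['\n']
    (PySem.List.slice (PySem.Chars.splitOn test_code.toList ['\n']) (some (pvStartLoopA 0 (PySem.Chars.splitOn test_code.toList ['\n']))) none))

-- ===== PORT B =====
-- c in " \t\r"
def pvIsHWS (c : Char) : Bool := c = ' ' || c = '\t' || c = '\r'

-- the inner 'while … in " \t\r": j += 1' scan followed by startswith("test(", j)
def pvLineHit (cs : List Char) : Bool :=
  PySem.Chars.startswith (cs.dropWhile pvIsHWS) ['t', 'e', 's', 't', '(']

-- B's while-loop over the line-start offset i, as recursion on the suffix test_code[i:];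
-- 'test_code.find("\n", i)' is the dropWhile, 'i = nl + 1' is recursing on what follows it
def pvScanB (cs : List Char) : Option (List Char) :=
  if pvLineHit cs then some cs
  else
    match h : cs.dropWhile (fun c => c != '\n') with
    | [] => none
    | _ :: rest => pvScanB rest
termination_by cs.length
decreasing_by
  have h2 : (cs.dropWhile (fun c => c != '\n')).length ≤ cs.length :=
    (List.dropWhile_suffix _).length_le
  rw [h] at h2
  simp only [List.length_cons] at h2
  omega

def extract_test_function_py_alt (test_code : String) : String :=
  match pvScanB test_code.toList with
  | some s => String.ofList s
  | none => test_code

-- ===== PRECONDITION & SPEC =====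
def Spec_extract_test_function_py (test_code : String) (out : String) : Prop := out = extract_test_function_py_alt test_code
instance (test_code : String) (out : String) : Decidable (Spec_extract_test_function_py test_code out) := by unfold Spec_extract_test_function_py; infer_instance

-- ===== CLAIM (what is proved, stated in full; the proofs are below) =====
def Claim_equal_extract_test_function_py : Prop := ∀ (test_code : String), Dom_extract_test_function_py test_code → Spec_extract_test_function_py test_code (extract_test_function_py test_code)

-- ===== LEMMAS AND PROOFS =====

-- PySem's fueled splitOn.go, with enough fuel, is Mathlib's List.splitOn
lemma pvGo_eq (fuel : Nat) (l cur : List Char) (acc : List (List Char)) (hf : l.length < fuel) :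
    PySem.Chars.splitOn.go ['\n'] fuel l cur acc
      = acc.reverse ++ (l.splitOn '\n').modifyHead (cur.reverse ++ ·) := by
  induction fuel generalizing l cur acc with
  | zero => omega
  | succ fuel ih =>
    cases l with
    | nil =>
      simp [PySem.Chars.splitOn.go, List.splitOn_nil, List.modifyHead]
    | cons c rest =>
      rw [PySem.Chars.splitOn.go]
      by_cases hc : c = '\n'
      · subst hc
        have hpre : ['\n'].isPrefixOf ('\n' :: rest) = true := by simp [List.isPrefixOf]
        rw [if_pos hpre]
        rw [ih _ _ _ (by simp at hf ⊢; omega)]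
        obtain ⟨hd, tl, hsp⟩ := List.exists_cons_of_ne_nil (List.splitOnP_ne_nil (· == '\n') rest)
        simp [List.splitOn, List.splitOnP_cons, hsp, List.modifyHead]
      · have hpre : ['\n'].isPrefixOf (c :: rest) = false := by
          simp only [List.isPrefixOf, Bool.and_true]
          exact beq_eq_false_iff_ne.mpr (fun h => hc h.symm)
        rw [if_neg (by simp [hpre])]
        rw [ih _ _ _ (by simp at hf ⊢; omega)]
        obtain ⟨hd, tl, hsp⟩ := List.exists_cons_of_ne_nil (List.splitOnP_ne_nil (· == '\n') rest)
        simp [List.splitOn, List.splitOnP_cons, hsp, List.modifyHead, hc]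

lemma pvSplitOn_eq (cs : List Char) :
    PySem.Chars.splitOn cs ['\n'] = cs.splitOn '\n' := by
  rw [PySem.Chars.splitOn, pvGo_eq _ _ _ _ (by omega)]
  obtain ⟨hd, tl, hsp⟩ := List.exists_cons_of_ne_nil (List.splitOnP_ne_nil (· == '\n') cs)
  simp [List.splitOn] at hsp ⊢
  simp [hsp, List.modifyHead]

lemma pvStartLoopA_none (L : List (List Char)) (i : Nat)
    (h : L.findIdx? pvHitA = none) : pvStartLoopA i L = -1 := by
  induction L generalizing i with
  | nil => simp [pvStartLoopA]
  | cons a L ih =>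
    rw [List.findIdx?_cons] at h
    by_cases ha : pvHitA a
    · simp [ha] at h
    · simp [ha] at h
      simp [pvStartLoopA, ha, ih _ (List.findIdx?_eq_none_iff.mpr h)]

lemma pvStartLoopA_some (L : List (List Char)) (i n : Nat)
    (h : L.findIdx? pvHitA = some n) : pvStartLoopA i L = ((i + n : Nat) : Int) := by
  induction L generalizing i n with
  | nil => simp at h
  | cons a L ih =>
    rw [List.findIdx?_cons] at h
    by_cases ha : pvHitA a
    · simp [ha] at h
      simp [pvStartLoopA, ha, ← h]
    · simp [ha] at h
      obtain ⟨m, hm, rfl⟩ := h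
      simp [pvStartLoopA, ha, ih _ _ hm]
      omega

-- "test(" contains no newline, so it is a prefix across the first newline iff it is one of the first line
lemma pvPrefix_append_nl' (P u b : List Char) (hP : '\n' ∉ P) :
    P.isPrefixOf (u ++ '\n' :: b) = P.isPrefixOf u := by
  induction P generalizing u with
  | nil => simp [List.isPrefixOf]
  | cons p P' ih =>
    have hp : p ≠ '\n' := fun h => hP (h ▸ List.mem_cons_self)
    have hP' : '\n' ∉ P' := fun h => hP (List.mem_cons_of_mem _ h)
    cases u with
    | nil => simp [List.isPrefixOf, hp]
    | cons c u' => simp only [List.cons_append, List.isPrefixOf, ih u' hP']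

lemma pvCharEqOfToNat (c d : Char) (h : c.toNat = d.toNat) : c = d :=
  Char.ext (UInt32.toBitVec_inj.mp (BitVec.toNat_inj.mp h))

lemma pvCharEqIffToNat (c d : Char) : c = d ↔ c.toNat = d.toNat :=
  ⟨fun h => h ▸ rfl, pvCharEqOfToNat c d⟩

-- on domain chars other than '\n', Python whitespace is exactly ' ', '\t', '\r'
lemma pvIsspace_eq (c : Char) (hd : pvDomChar c = true) (hne : c ≠ '\n') :
    PySem.Chars.isspace c = pvIsHWS c := by
  have hdn : c.toNat ≠ 10 := fun h => hne ((pvCharEqIffToNat c '\n').mpr h)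
  simp only [pvDomChar, Bool.or_eq_true, Bool.and_eq_true, decide_eq_true_eq, beq_iff_eq] at hd
  simp only [PySem.Chars.isspace, pvIsHWS, pvCharEqIffToNat]
  apply Bool.eq_iff_iff.mpr
  simp only [Bool.or_eq_true, Bool.and_eq_true, decide_eq_true_eq]
  have h32 : (' ').toNat = 32 := rfl
  have h9 : ('\t').toNat = 9 := rfl
  have h13 : ('\r').toNat = 13 := rfl
  rw [h32, h9, h13]
  omega

lemma pvDropWhile_ws (u : List Char) (hd : ∀ c ∈ u, pvDomChar c = true) (hnl : '\n' ∉ u) :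
    u.dropWhile PySem.Chars.isspace = u.dropWhile pvIsHWS := by
  induction u with
  | nil => rfl
  | cons c u ih =>
    have hc : PySem.Chars.isspace c = pvIsHWS c :=
      pvIsspace_eq c (hd c List.mem_cons_self) (fun h => hnl (h ▸ List.mem_cons_self))
    rw [List.dropWhile_cons, List.dropWhile_cons, hc,
      ih (fun x hx => hd x (List.mem_cons_of_mem _ hx)) (fun h => hnl (List.mem_cons_of_mem _ h))]

-- rstrip cannot eat into a "test(" prefix (its last char '(' is not whitespace)
lemma pvPrefix_rstrip (v : List Char) :
    (['t', 'e', 's', 't', '('].isPrefixOf (PySem.Chars.rstrip v)) = ['t', 'e', 's', 't', '('].isPrefixOf v := by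
  apply Bool.eq_iff_iff.mpr
  rw [List.isPrefixOf_iff_prefix, List.isPrefixOf_iff_prefix]
  constructor
  · intro h
    refine h.trans ?_
    have hs : (List.dropWhile PySem.Chars.isspace v.reverse).reverse <+: v.reverse.reverse :=
      List.reverse_prefix.mpr (List.dropWhile_suffix _)
    rw [PySem.Chars.rstrip]
    simpa using hs
  · rintro ⟨t, rfl⟩
    rw [PySem.Chars.rstrip]
    rw [List.reverse_append, List.dropWhile_append]
    have hP : List.dropWhile PySem.Chars.isspace ['t', 'e', 's', 't', '('].reverse
        = ['t', 'e', 's', 't', '('].reverse := by decide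
    by_cases he : (List.dropWhile PySem.Chars.isspace t.reverse).isEmpty
    · rw [if_pos he, hP]
      simp
    · rw [if_neg (by simp [he]), List.reverse_append, List.reverse_reverse]
      exact ⟨_, rfl⟩

-- B's line-start check agrees with A's per-line check, for a whole last line …
lemma pvLineHit_eq_hitA (u : List Char) (hd : ∀ c ∈ u, pvDomChar c = true) (hnl : '\n' ∉ u) :
    pvLineHit u = pvHitA u := by
  rw [pvLineHit, pvHitA, PySem.Chars.startswith, PySem.Chars.startswith, PySem.Chars.strip]
  rw [pvPrefix_rstrip (PySem.Chars.lstrip u)]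
  rw [PySem.Chars.lstrip, pvDropWhile_ws u hd hnl]

-- … and for a line followed by a newline and the rest of the text
lemma pvLineHit_append (a b : List Char) (hd : ∀ c ∈ a, pvDomChar c = true) (hnl : '\n' ∉ a) :
    pvLineHit (a ++ '\n' :: b) = pvHitA a := by
  rw [pvLineHit, PySem.Chars.startswith, List.dropWhile_append]
  by_cases he : (a.dropWhile pvIsHWS).isEmpty
  · rw [if_pos he]
    rw [List.dropWhile_cons_of_neg (by decide)]
    have h1 : ['t', 'e', 's', 't', '('].isPrefixOf ('\n' :: b) = false := by
      simp [List.isPrefixOf]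
    have h2 : pvHitA a = false := by
      rw [pvHitA, PySem.Chars.startswith, PySem.Chars.strip, ← pvPrefix_rstrip,
        PySem.Chars.lstrip, pvDropWhile_ws a hd hnl]
      have : a.dropWhile pvIsHWS = [] := by simpa [List.isEmpty_iff] using he
      rw [PySem.Chars.rstrip, this]
      decide
    rw [h1, h2]
  · rw [if_neg he, pvPrefix_append_nl' _ _ _ (by decide)]
    have := pvLineHit_eq_hitA a hd hnl
    simpa [pvLineHit, PySem.Chars.startswith] using this

lemma pvDropWhileHead {p : Char → Bool} {l : List Char} {x : Char} {xs : List Char}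
    (h : l.dropWhile p = x :: xs) : p x = false := by
  induction l with
  | nil => simp at h
  | cons c l ih =>
    rw [List.dropWhile_cons] at h
    by_cases hc : p c
    · simp [hc] at h; exact ih h
    · simp [hc] at h
      simp [← h.1, hc]

-- the heart of the equivalence: B's raw scan finds exactly the line A's index finds,
-- and returning the raw suffix equals rejoining the remaining lines
lemma pvMain (n : Nat) : ∀ (cs : List Char), cs.length ≤ n → (∀ c ∈ cs, pvDomChar c = true) →
    pvScanB cs
      = ((cs.splitOn '\n').findIdx? pvHitA).map
          (fun k => PySem.Chars.join ['\n'] ((cs.splitOn '\n').drop k)) := by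
  induction n with
  | zero =>
    intro cs hlen _
    have : cs = [] := List.eq_nil_of_length_eq_zero (by omega)
    subst this
    rw [pvScanB]
    decide
  | succ n ih =>
    intro cs hlen hd
    by_cases hmem : '\n' ∈ cs
    · -- cs = a ++ '\n' :: b with '\n' ∉ a
      have hdwne : cs.dropWhile (fun c => c != '\n') ≠ [] := by
        intro hnil
        have := List.dropWhile_eq_nil_iff.mp hnil '\n' hmem
        simp at this
      obtain ⟨d, b, hdb⟩ := List.exists_cons_of_ne_nil hdwne
      have hdeq : d = '\n' := by simpa using pvDropWhileHead hdb
      subst hdeq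
      have hcs : cs.takeWhile (fun c => c != '\n') ++ '\n' :: b = cs := by
        rw [← hdb]; exact List.takeWhile_append_dropWhile
      set a := cs.takeWhile (fun c => c != '\n') with ha
      have hnla : '\n' ∉ a := fun h => by simpa using List.mem_takeWhile_imp h
      have hda : ∀ c ∈ a, pvDomChar c = true := fun c hc => hd c (by rw [← hcs]; exact List.mem_append_left _ hc)
      have hdbD : ∀ c ∈ b, pvDomChar c = true := fun c hc =>
        hd c (by rw [← hcs]; exact List.mem_append_right _ (List.mem_cons_of_mem _ hc))
      have hsp : cs.splitOn '\n' = a :: b.splitOn '\n' := by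
        rw [← hcs]
        simp only [List.splitOn]
        exact List.splitOnP_first _ a (fun x hx => by simp only [beq_iff_eq]; rintro rfl; exact hnla hx) '\n' (by simp) b
      rw [pvScanB]
      by_cases hhit : pvLineHit cs
      · have hh : pvHitA a = true := by rw [← pvLineHit_append a b hda hnla, hcs]; exact hhit
        rw [if_pos hhit, hsp]
        rw [List.findIdx?_cons, if_pos hh]
        have hjoin : PySem.Chars.join ['\n'] (cs.splitOn '\n') = cs := by
          rw [PySem.Chars.join]; exact List.intercalate_splitOn cs '\n'
        rw [hsp] at hjoin
        simp [hjoin]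
      · have hh : pvHitA a = false := by
          rw [← pvLineHit_append a b hda hnla, hcs]; simpa using hhit
        rw [if_neg hhit]
        have hblen : b.length ≤ n := by
          have := congrArg List.length hcs
          simp at this
          omega
        have hib := ih b hblen hdbD
        split
        · next heq => rw [heq] at hdb; simp at hdb
        · next x rest heq =>
          rw [heq] at hdb
          injection hdb with _ hrest
          subst hrest
          rw [hib, hsp, List.findIdx?_cons, if_neg (by simp [hh]), Option.map_map]
          rcases hfi : (List.splitOn '\n' rest).findIdx? pvHitA with _ | k
          · simp
          · simp [List.drop_succ_cons]
    · -- single line, no newline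
      have hsp : cs.splitOn '\n' = [cs] := by
        simp only [List.splitOn]
        exact List.splitOnP_eq_single _ _ (fun x hx => by simp only [beq_iff_eq]; rintro rfl; exact hmem hx)
      rw [pvScanB]
      by_cases hhit : pvLineHit cs
      · have hh : pvHitA cs = true := by rw [← pvLineHit_eq_hitA cs hd hmem]; exact hhit
        rw [if_pos hhit, hsp, List.findIdx?_cons, if_pos hh]
        have hjoin : PySem.Chars.join ['\n'] [cs] = cs := PySem.Chars.join_singleton _ _
        simp [hjoin]
      · have hh : pvHitA cs = false := by
          rw [← pvLineHit_eq_hitA cs hd hmem]; simpa using hhit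
        have hdw : cs.dropWhile (fun c => c != '\n') = [] :=
          List.dropWhile_eq_nil_iff.mpr (fun x hx => by simp only [bne_iff_ne, ne_eq]; rintro rfl; exact hmem hx)
        rw [if_neg hhit]
        split
        · rw [hsp, List.findIdx?_cons, if_neg (by simp [hh])]
          simp
        · next x rest heq => rw [hdw] at heq; simp at heq

-- ===== VERDICT (by name: the statement is the Claim_ definition above) =====
theorem extract_test_function_py_spec : Claim_equal_extract_test_function_py := by
  intro tc hdom
  unfold Spec_extract_test_function_py extract_test_function_py extract_test_function_py_alt
  have hd : ∀ c ∈ tc.toList, pvDomChar c = true := by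
    simpa [Dom_extract_test_function_py, pvDomStr, List.all_eq_true] using hdom
  have hmain := pvMain tc.toList.length tc.toList le_rfl hd
  rcases h : (tc.toList.splitOn '\n').findIdx? pvHitA with _ | k
  · rw [h] at hmain
    simp only [Option.map_none] at hmain
    rw [hmain, pvSplitOn_eq, pvStartLoopA_none _ 0 h]
    simp
  · rw [h] at hmain
    simp only [Option.map_some] at hmain
    rw [hmain, pvSplitOn_eq, pvStartLoopA_some _ 0 k h]
    simp only [Nat.zero_add, PySem.List.slice_from_natCast]
    rw [if_neg (show ((k : Nat) : Int) ≠ -1 by omega)]
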